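-- pv_equiv track=rewrite | github.com/atticuskramer/advent-of-code | aoc-day-25.py | snafu_increment
-- ===== SOURCE A (Python) =====
-- snafu_dict = {'=' : -2, '-' : -1, '0' : 0, '1' : 1, '2' : 2}
--
-- rev_snafu_dict = {value : key for key, value in snafu_dict.items()}
--
-- def snafu_increment(snafu):
--     num = snafu_dict[snafu[-1]]
--     num += 1
--     if num > 2:
--         if len(snafu) > 1:
--             return snafu_increment(snafu[:-1]) + ['=']
--         else:
--             return ['1', '=']
--     else:
--         return snafu[:-1] + [rev_snafu_dict[num]]
-- ===== SOURCE B (Python) =====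
-- # B: instead of recursing per carry, count the run of trailing '2's once,
-- # then build the answer with slicing, a 4-entry bump table and a '=' * k suffix.
-- def snafu_increment(snafu):
--     bump = {'=': '-', '-': '0', '0': '1', '1': '2'}
--     n = len(snafu)
--     k = 0
--     while k < n and snafu[n - 1 - k] == '2':
--         k += 1
--     if k == n:
--         return ['1'] + ['='] * k
--     i = n - 1 - k
--     return snafu[:i] + [bump[snafu[i]]] + ['='] * k
-- ===== Notes on version B (the rewrite author's own statement) =====
-- stated objective: simpler
-- what changed: A recurses once per carried digit, re-slicing and re-appending at each level; B counts the trailing run of '2's in one rightward scan and builds the result directly as prefix-slice + one table-bumped digit + '=' * k (or ['1'] + '=' * k on full overflow), with no recursion.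
import Mathlib
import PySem

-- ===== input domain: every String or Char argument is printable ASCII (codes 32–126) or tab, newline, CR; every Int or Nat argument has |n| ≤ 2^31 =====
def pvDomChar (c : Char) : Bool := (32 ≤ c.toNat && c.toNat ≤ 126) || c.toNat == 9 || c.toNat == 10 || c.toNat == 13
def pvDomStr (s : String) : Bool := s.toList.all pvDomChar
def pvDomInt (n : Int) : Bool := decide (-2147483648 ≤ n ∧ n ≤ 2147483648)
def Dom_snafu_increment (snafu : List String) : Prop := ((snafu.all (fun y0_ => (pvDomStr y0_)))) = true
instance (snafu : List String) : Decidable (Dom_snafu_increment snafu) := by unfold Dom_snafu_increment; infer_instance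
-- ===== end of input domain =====

-- B replaces A's one-recursion-per-carry with a single count of the trailing '2'-run,
-- then builds the result by a slice, one table bump and a replicated '=' suffix (objective: simpler).

-- ===== PORT A =====
def snafuDict : PySem.Dict String Int :=
  PySem.Dict.ofList [("=", -2), ("-", -1), ("0", 0), ("1", 1), ("2", 2)]

def revSnafuDict : PySem.Dict Int String :=
  PySem.Dict.ofList [(-2, "="), (-1, "-"), (0, "0"), (1, "1"), (2, "2")]

-- snafu[-1] (IndexError on []) and the two dict lookups (KeyError) are excluded by Pre_;
-- the .getD defaults are never reached under Pre_.
def snafu_increment (snafu : List String) : List String :=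
  let num : Int := (snafuDict.get? (PySem.List.pyGetD snafu (-1) "")).getD 0 + 1
  if num > 2 then
    if _h : snafu.length > 1 then
      snafu_increment (PySem.List.slice snafu none (some (-1))) ++ ["="]
    else ["1", "="]
  else
    PySem.List.slice snafu none (some (-1)) ++ [(revSnafuDict.get? num).getD ""]
termination_by snafu.length
decreasing_by rw [PySem.List.slice_to_neg_one]; simp; omega

-- ===== PORT B =====
def bumpTable : PySem.Dict String String :=
  PySem.Dict.ofList [("=", "-"), ("-", "0"), ("0", "1"), ("1", "2")]

-- Source B's while loop scanning the trailing '2'-run from the right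
def twosRun : List String → Nat
  | [] => 0
  | d :: rest => if d == "2" then twosRun rest + 1 else 0

def snafu_increment_alt (snafu : List String) : List String :=
  let n := snafu.length
  let k := twosRun snafu.reverse
  if k = n then "1" :: List.replicate k "="
  else
    let i := n - 1 - k
    snafu.take i ++ [(bumpTable.get? (snafu.getD i "")).getD ""] ++ List.replicate k "="

-- ===== PRECONDITION & SPEC =====
-- Pre_ is exactly A's return domain: the list is nonempty and the first non-'2' digit
-- from the right (if any) is one of '=', '-', '0', '1'; elsewhere A raises IndexError/KeyError.
def Pre_snafu_increment (snafu : List String) : Prop :=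
  snafu ≠ [] ∧ (snafu.reverse.dropWhile (· == "2")).headD "=" ∈ (["=", "-", "0", "1"] : List String)

instance (snafu : List String) : Decidable (Pre_snafu_increment snafu) := by
  unfold Pre_snafu_increment; infer_instance

def pvWitness_snafu_increment : List String := ["1", "0", "2", "2"]

def Spec_snafu_increment (snafu : List String) (out : List String) : Prop := out = snafu_increment_alt snafu
instance (snafu : List String) (out : List String) : Decidable (Spec_snafu_increment snafu out) := by unfold Spec_snafu_increment; infer_instance

-- ===== CLAIM (what is proved, stated in full; the proofs are below) =====
def Claim_equal_snafu_increment : Prop := ∀ (snafu : List String), Dom_snafu_increment snafu → Pre_snafu_increment snafu → Spec_snafu_increment snafu (snafu_increment snafu)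

-- ===== LEMMAS AND PROOFS =====

lemma twosRun_le (l : List String) : twosRun l ≤ l.length := by
  induction l with
  | nil => simp [twosRun]
  | cons d rest ih => simp only [twosRun, List.length_cons]; split <;> omega

-- appending a carried '2' appends one more '=' to B's answer
lemma alt_append_two (ys : List String) :
    snafu_increment_alt (ys ++ ["2"]) = snafu_increment_alt ys ++ ["="] := by
  have hrev : (ys ++ ["2"]).reverse = "2" :: ys.reverse := by simp
  have hrun : twosRun ((ys ++ ["2"]).reverse) = twosRun ys.reverse + 1 := by
    rw [hrev]; simp [twosRun]
  by_cases hk : twosRun ys.reverse = ys.length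
  · simp only [snafu_increment_alt, hrun, hk, List.length_append, List.length_cons,
      List.length_nil]
    rw [List.replicate_succ']
    simp
  · have hle : twosRun ys.reverse ≤ ys.length := by
      simpa using twosRun_le ys.reverse
    have hlt : twosRun ys.reverse < ys.length := lt_of_le_of_ne hle hk
    simp only [snafu_increment_alt, hrun, List.length_append, List.length_cons, List.length_nil]
    rw [if_neg (by omega), if_neg hk]
    have hi : ys.length + 0 + 1 - 1 - (twosRun ys.reverse + 1) = ys.length - 1 - twosRun ys.reverse := by omega
    have hilt : ys.length - 1 - twosRun ys.reverse < ys.length := by omega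
    rw [hi, List.take_append_of_le_length (by omega),
        List.getD_append _ _ _ _ hilt, List.replicate_succ']
    simp

lemma main_equiv : ∀ (n : Nat) (snafu : List String), snafu.length ≤ n →
    Pre_snafu_increment snafu → snafu_increment snafu = snafu_increment_alt snafu := by
  intro n
  induction n with
  | zero =>
    intro snafu hlen ⟨hne, _⟩
    cases snafu with
    | nil => exact absurd rfl hne
    | cons a l => simp at hlen
  | succ n ih =>
    intro snafu hlen hpre
    obtain ⟨hne, hhead⟩ := hpre
    rcases List.eq_nil_or_concat snafu with rfl | ⟨ys, d, hconcat⟩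
    · exact absurd rfl hne
    rw [List.concat_eq_append] at hconcat
    subst hconcat
    have hget : PySem.List.pyGetD (ys ++ [d]) (-1) "" = d :=
      PySem.List.pyGetD_neg_one_append_singleton ys d ""
    have hslice : PySem.List.slice (ys ++ [d]) none (some (-1)) = ys := by
      rw [PySem.List.slice_to_neg_one]; simp
    have hrev : (ys ++ [d]).reverse = d :: ys.reverse := by simp
    by_cases hd2 : d = "2"
    · subst hd2
      rcases List.eq_nil_or_concat ys with rfl | ⟨zs, e, hc⟩
      · -- snafu = ["2"]
        rw [snafu_increment]; decide
      · -- carry into a nonempty prefix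
        rw [List.concat_eq_append] at hc
        subst hc
        have hys : zs ++ [e] ≠ [] := by simp
        rw [snafu_increment]
        simp only [hget, hslice]
        rw [if_pos (by decide), dif_pos (by simp only [List.length_append, List.length_cons, List.length_nil]; omega)]
        have hpre' : Pre_snafu_increment (zs ++ [e]) := by
          refine ⟨hys, ?_⟩
          have : ((zs ++ [e] ++ ["2"]).reverse).dropWhile (· == "2")
               = ((zs ++ [e]).reverse).dropWhile (· == "2") := by
            simp [List.dropWhile]
          rwa [this] at hhead
        rw [ih (zs ++ [e]) (by simp only [List.length_append, List.length_cons, List.length_nil] at hlen ⊢; omega) hpre', alt_append_two _]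
    · -- last digit is not '2': no carry past it
      have hrun : twosRun ((ys ++ [d]).reverse) = 0 := by
        rw [hrev]; simp [twosRun, hd2]
      have hdmem : d ∈ (["=", "-", "0", "1"] : List String) := by
        have : ((ys ++ [d]).reverse).dropWhile (· == "2") = d :: ys.reverse := by
          rw [hrev, List.dropWhile_cons_of_neg (by simp [hd2])]
        rwa [this] at hhead
      have hB : snafu_increment_alt (ys ++ [d])
          = ys ++ [(bumpTable.get? d).getD ""] := by
        simp only [snafu_increment_alt, hrun, List.length_append, List.length_cons,
          List.length_nil]
        rw [if_neg (by omega)]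
        have hi : ys.length + 0 + 1 - 1 - 0 = ys.length := by omega
        rw [hi, List.take_append_of_le_length (le_refl _), List.take_length]
        have hgd : (ys ++ [d]).getD ys.length "" = d := by
          rw [List.getD_eq_getElem?_getD, List.getElem?_concat_length]; rfl
        rw [hgd]
        simp
      rw [snafu_increment]
      simp only [hget, hslice]
      fin_cases hdmem <;> simp [hB] <;> rfl

-- ===== VERDICT (by name: the statement is the Claim_ definition above) =====
theorem snafu_increment_spec : Claim_equal_snafu_increment := by
  intro snafu _ hpre
  unfold Spec_snafu_increment
  exact main_equiv snafu.length snafu (le_refl _) hpre
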